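-- pv_equiv track=rewrite | github.com/benmeyersUSC/RandomScripts | unsolvability/godel_numbering.py | formulize
-- ===== SOURCE A (Python) =====
-- def nth_prime(n):
--     def is_prime(num):
--         if num < 2:
--             return False
--         for i in range(2, int(num ** 0.5) + 1):
--             if num % i == 0:
--                 return False
--         return True
--
--     count = 0
--     num = 2
--     while count < n:
--         if is_prime(num):
--             count += 1
--         if count == n:
--             return num
--         num += 1
--
-- def formulize(godel_number: int) -> str:
--
--     reversed_mapping_dict = {
--         1: "-", 2: "|", 3: "@", 4: "E", 5: "=", 6: "0", 7: "s", 8: "(", 9: ")", 10: ",", 11: "+", 12: "*",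
--         13: "x", 17: "y", 19: "z", 367: "p", 373: "q", 379: "r", 383: "P", 389: "Q", 397: "R"
--     }
--
--     formula = ""
--     prime_i = 1
--
--     while godel_number > 1:
--         prime = nth_prime(prime_i)
--         exponent = 0
--
--         while godel_number % prime == 0:
--             godel_number //= prime
--             exponent += 1
--
--         if exponent > 0:
--             formula += reversed_mapping_dict[exponent]
--
--         prime_i += 1
--
--     return formula
-- ===== SOURCE B (Python) =====
-- def formulize(godel_number: int) -> str:
--     # Trial division by successive integers up to sqrt(n): composite divisors can
--     # never fire once their prime factors are removed, so no primality testing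
--     # (and no nth_prime recomputation) is needed at all.
--     mapping = {
--         1: "-", 2: "|", 3: "@", 4: "E", 5: "=", 6: "0", 7: "s", 8: "(", 9: ")", 10: ",", 11: "+", 12: "*",
--         13: "x", 17: "y", 19: "z", 367: "p", 373: "q", 379: "r", 383: "P", 389: "Q", 397: "R"
--     }
--     parts = []
--     n = godel_number
--     d = 2
--     while d * d <= n:
--         e = 0
--         while n % d == 0:
--             n //= d
--             e += 1
--         if e:
--             parts.append(mapping[e])
--         d += 1
--     if n > 1:
--         parts.append(mapping[1])
--     return "".join(parts)
-- ===== Notes on version B (the rewrite author's own statement) =====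
-- stated objective: faster
-- what changed: B replaces A's prime-by-prime loop (which recomputes nth_prime from scratch, with a trial-division primality test, for every prime index) by plain trial division by successive integers up to the square root -- a composite divisor can never fire once its prime factors are divided out, so no primality testing or prime generation is needed; the remaining cofactor above the square root is emitted as one final exponent-one symbol.
import Mathlib
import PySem

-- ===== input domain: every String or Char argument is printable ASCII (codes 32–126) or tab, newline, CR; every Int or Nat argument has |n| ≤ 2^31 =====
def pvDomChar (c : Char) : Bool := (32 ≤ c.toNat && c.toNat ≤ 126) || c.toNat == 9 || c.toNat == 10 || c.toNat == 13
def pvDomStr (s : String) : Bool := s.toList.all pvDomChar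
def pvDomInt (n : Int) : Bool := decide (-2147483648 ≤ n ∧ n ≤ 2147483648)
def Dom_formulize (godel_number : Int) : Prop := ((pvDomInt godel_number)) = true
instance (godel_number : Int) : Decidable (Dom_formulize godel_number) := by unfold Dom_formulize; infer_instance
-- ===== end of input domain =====

-- B replaces A's nth_prime-from-scratch prime loop by plain trial division by successive
-- integers up to the square root; objective: faster (intended asymptotic gain; the timing
-- run's measurement is recorded in its report).

-- ===== PORT A =====

-- Shared inner loop "while godel_number % prime == 0: godel_number //= prime; exponent += 1"
-- (both Pythons contain it verbatim).  All call sites satisfy 2 ≤ d and 0 < g, where Python's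
-- % and //= agree with Nat.mod / Nat.div; the dite guard only ensures termination.
def divOut (g d : Nat) : Nat × Nat :=
  if h : 2 ≤ d ∧ d ∣ g ∧ 0 < g then
    ((divOut (g / d) d).1, (divOut (g / d) d).2 + 1)
  else (g, 0)
termination_by g
decreasing_by exact Nat.div_lt_self h.2.2 h.1

def revMapA : PySem.Dict Nat String := PySem.Dict.ofList
  [(1, "-"), (2, "|"), (3, "@"), (4, "E"), (5, "="), (6, "0"), (7, "s"), (8, "("), (9, ")"),
   (10, ","), (11, "+"), (12, "*"), (13, "x"), (17, "y"), (19, "z"), (367, "p"), (373, "q"),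
   (379, "r"), (383, "P"), (389, "Q"), (397, "R")]

-- is_prime: for-loop over range(2, int(num ** 0.5) + 1) with early return False.
-- int(num ** 0.5) = Nat.sqrt num exactly for every num reachable from the stated
-- |godel_number| ≤ 2^31 domain (IEEE double sqrt is correctly rounded there).
def isPrimeA (num : Nat) : Bool :=
  if num < 2 then false
  else (List.range' 2 (Nat.sqrt num + 1 - 2)).all fun i => num % i != 0

-- the "count/num" scanning loop of nth_prime; called only with 1 ≤ n, where the
-- `while count < n` test is equivalent to the `c = n` return test below.  The fuel
-- argument only makes the scan total; 2^(n+1) steps always suffice (proved below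
-- via Bertrand's postulate), so it never alters the computation.
def nthPrimeAux (n : Nat) : Nat → Nat → Nat → Nat
  | 0, _, _ => 0
  | f + 1, count, num =>
    let c := if isPrimeA num then count + 1 else count
    if c = n then num else nthPrimeAux n f c (num + 1)

def nthPrimeA (n : Nat) : Nat := nthPrimeAux n (2 ^ (n + 1)) 0 2

-- the main `while godel_number > 1` loop; fuel godel_number+1 always suffices (proved
-- below).  `reversed_mapping_dict[exponent]` raises KeyError outside the table's keys;
-- those inputs are excluded by Pre_formulize, so getD's default is never reached there.
def aLoopA : Nat → Nat → Nat → String → String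
  | 0, _, _, formula => formula
  | f + 1, g, primeI, formula =>
    if 1 < g then
      aLoopA f (divOut g (nthPrimeA primeI)).1 (primeI + 1)
        (if 0 < (divOut g (nthPrimeA primeI)).2 then
          formula ++ PySem.Dict.getD revMapA (divOut g (nthPrimeA primeI)).2 ""
        else formula)
    else formula

-- the loop body runs only while godel_number > 1, where Int and Nat agree (toNat sends
-- every godel_number ≤ 1 to a value ≤ 1, for which the loop exits at once, as in Python).
def formulize (godel_number : Int) : String :=
  aLoopA (godel_number.toNat + 1) godel_number.toNat 1 ""

-- ===== PORT B =====

def revMapB : PySem.Dict Nat String := PySem.Dict.ofList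
  [(1, "-"), (2, "|"), (3, "@"), (4, "E"), (5, "="), (6, "0"), (7, "s"), (8, "("), (9, ")"),
   (10, ","), (11, "+"), (12, "*"), (13, "x"), (17, "y"), (19, "z"), (367, "p"), (373, "q"),
   (379, "r"), (383, "P"), (389, "Q"), (397, "R")]

-- needed by bLoopB's decreasing_by, hence stated here (proved below the claim block is not
-- allowed for termination; proof is by the recursion structure of divOut)
theorem divOut_fst_le (g d : Nat) : (divOut g d).1 ≤ g := by
  induction g using Nat.strong_induction_on with
  | _ g ih =>
    rw [divOut]
    split
    · next h =>
      exact le_trans (ih (g / d) (Nat.div_lt_self h.2.2 h.1)) (Nat.div_le_self g d)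
    · exact le_refl g

-- `while d * d <= n` trial-division loop of B; the 2 ≤ d conjunct only serves the
-- termination measure and holds at every call site (d starts at two and increases).
def bLoopB (n d : Nat) (parts : List String) : List String :=
  if _h : 2 ≤ d ∧ d * d ≤ n then
    bLoopB (divOut n d).1 (d + 1)
      (if 0 < (divOut n d).2 then parts ++ [PySem.Dict.getD revMapB (divOut n d).2 ""] else parts)
  else if 1 < n then parts ++ [PySem.Dict.getD revMapB 1 ""] else parts
termination_by n + 2 - d
decreasing_by
  have h1 : (divOut n d).1 ≤ n := divOut_fst_le n d
  have h2 : d ≤ d * d := Nat.le_mul_of_pos_left d (by omega)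
  omega

-- as in port A, the loop only touches godel_number while it is > 1
def formulize_alt (godel_number : Int) : String :=
  PySem.Str.join "" (bLoopB godel_number.toNat 2 [])

-- ===== PRECONDITION & SPEC =====

def pvExpKeys : List Nat :=
  [1, 2, 3, 4, 5, 6, 7, 8, 9, 10, 11, 12, 13, 17, 19, 367, 373, 379, 383, 389, 397]

-- multiplicity of p in n, read off as how many of the first thirty-two powers of p
-- divide n (exact for every multiplicity the |n| ≤ 2^31 domain can produce)
def pvExpOf (n p : Nat) : Nat := ((List.range 32).filter fun i => n % p ^ (i + 1) == 0).length

-- Pre_ excludes exactly the inputs on which Python A RAISES KeyError: the exponent of some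
-- prime factor lies outside reversed_mapping_dict's keys.  Every exponent the table lacks
-- is at least fourteen, and on the |godel_number| ≤ 2^31 domain so large an exponent can
-- only occur for the two smallest primes (the fourteenth power of the next prime already
-- exceeds the domain bound), so the two checks below capture that condition exactly there.
def Pre_formulize (godel_number : Int) : Prop :=
  1 < godel_number →
    (pvExpOf godel_number.toNat 2 ∈ 0 :: pvExpKeys ∧ pvExpOf godel_number.toNat 3 ∈ 0 :: pvExpKeys)

instance (godel_number : Int) : Decidable (Pre_formulize godel_number) := by
  unfold Pre_formulize; infer_instance

def pvWitness_formulize : Int := (12)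

def Spec_formulize (godel_number : Int) (out : String) : Prop := out = formulize_alt godel_number
instance (godel_number : Int) (out : String) : Decidable (Spec_formulize godel_number out) := by
  unfold Spec_formulize; infer_instance

-- ===== CLAIM (what is proved, stated in full; the proofs are below) =====
def Claim_equal_formulize : Prop := ∀ (godel_number : Int), Dom_formulize godel_number → Pre_formulize godel_number → Spec_formulize godel_number (formulize godel_number)

-- ===== LEMMAS AND PROOFS =====

theorem maps_eq : revMapB = revMapA := rfl

-- ---- divOut ----

theorem divOut_of_not_dvd {g d : Nat} (h : ¬ d ∣ g) : divOut g d = (g, 0) := by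
  rw [divOut]; rw [dif_neg]; tauto

theorem divOut_spec (g d : Nat) (hd : 2 ≤ d) (hg : 0 < g) :
    0 < (divOut g d).1 ∧ ¬ d ∣ (divOut g d).1 ∧ g = (divOut g d).1 * d ^ (divOut g d).2 := by
  induction g using Nat.strong_induction_on with
  | _ g ih =>
    by_cases hdvd : d ∣ g
    · rw [divOut, dif_pos ⟨hd, hdvd, hg⟩]
      have hlt : g / d < g := Nat.div_lt_self hg hd
      have hpos : 0 < g / d := Nat.div_pos (Nat.le_of_dvd hg hdvd) (by omega)
      obtain ⟨h1, h2, h3⟩ := ih (g / d) hlt hpos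
      refine ⟨h1, h2, ?_⟩
      have := Nat.div_mul_cancel hdvd
      calc g = g / d * d := (Nat.div_mul_cancel hdvd).symm
        _ = (divOut (g / d) d).1 * d ^ (divOut (g / d) d).2 * d := by rw [← h3]
        _ = (divOut (g / d) d).1 * d ^ ((divOut (g / d) d).2 + 1) := by ring
    · rw [divOut_of_not_dvd hdvd]
      exact ⟨hg, hdvd, by simp⟩

theorem divOut_exp_pos {g d : Nat} (hd : 2 ≤ d) (hdvd : d ∣ g) (hg : 0 < g) :
    0 < (divOut g d).2 := by
  rw [divOut, dif_pos ⟨hd, hdvd, hg⟩]; omega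

theorem divOut_fst_lt {g d : Nat} (hd : 2 ≤ d) (hg : 0 < g) (hdvd : d ∣ g) :
    (divOut g d).1 < g := by
  obtain ⟨h1, _, h3⟩ := divOut_spec g d hd hg
  have he : 0 < (divOut g d).2 := divOut_exp_pos hd hdvd hg
  have : 2 ≤ d ^ (divOut g d).2 := le_trans hd (Nat.le_self_pow (by omega) d)
  nlinarith

-- ---- is_prime ----

theorem isPrimeA_iff (n : Nat) : isPrimeA n = true ↔ n.Prime := by
  unfold isPrimeA
  split
  · next h => simp only [Bool.false_eq_true, false_iff]
              intro hp; exact absurd hp.two_le (by omega)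
  · next h =>
    have h2 : 2 ≤ n := by omega
    rw [List.all_eq_true]
    rw [Nat.prime_def_le_sqrt]
    constructor
    · intro hall
      refine ⟨h2, fun m hm hms => ?_⟩
      have hs1 : 1 ≤ Nat.sqrt n := Nat.le_sqrt.mpr (by omega)
      have : m ∈ List.range' 2 (Nat.sqrt n + 1 - 2) := by
        rw [List.mem_range'_1]
        omega
      have := hall m this
      simp only [bne_iff_ne, ne_eq] at this
      intro hdvd
      exact this (Nat.dvd_iff_mod_eq_zero.mp hdvd)
    · rintro ⟨-, hmin⟩ i hi
      rw [List.mem_range'_1] at hi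
      simp only [bne_iff_ne, ne_eq]
      intro hmod
      exact hmin i (by omega) (by omega) (Nat.dvd_of_mod_eq_zero hmod)

-- ---- least prime from num, and the k-th prime from num ----

def lpf (num : Nat) : Nat := Nat.find (Nat.exists_infinite_primes num)

theorem lpf_ge (num : Nat) : num ≤ lpf num := (Nat.find_spec (Nat.exists_infinite_primes num)).1

theorem lpf_prime (num : Nat) : (lpf num).Prime := (Nat.find_spec (Nat.exists_infinite_primes num)).2

theorem lpf_min {num q : Nat} (hq : q.Prime) (hge : num ≤ q) : lpf num ≤ q :=
  Nat.find_min' (Nat.exists_infinite_primes num) ⟨hge, hq⟩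

theorem lpf_of_prime {p : Nat} (hp : p.Prime) : lpf p = p :=
  le_antisymm (lpf_min hp le_rfl) (lpf_ge p)

theorem lpf_succ_of_not_prime {num : Nat} (h : ¬ num.Prime) : lpf num = lpf (num + 1) := by
  apply le_antisymm
  · exact lpf_min (lpf_prime (num + 1)) (le_trans (Nat.le_succ num) (lpf_ge (num + 1)))
  · apply lpf_min (lpf_prime num)
    have := lpf_ge num
    rcases Nat.eq_or_lt_of_le this with heq | hlt
    · exact absurd (heq ▸ lpf_prime num) h
    · omega

theorem lpf_le_two_mul {m : Nat} (hm : 2 ≤ m) : lpf (m + 1) ≤ 2 * m := by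
  obtain ⟨p, hp, hlt, hle⟩ := Nat.exists_prime_lt_and_le_two_mul m (by omega)
  exact le_trans (lpf_min hp (by omega)) hle

def kthFrom : Nat → Nat → Nat
  | 0, num => lpf num
  | k + 1, num => kthFrom k (lpf num + 1)

theorem kthFrom_ge (k : Nat) : ∀ num, num ≤ kthFrom k num := by
  induction k with
  | zero => exact lpf_ge
  | succ k ih =>
    intro num
    have h1 := lpf_ge num
    have h2 := ih (lpf num + 1)
    simp only [kthFrom]
    omega

theorem kthFrom_prime (k : Nat) : ∀ num, (kthFrom k num).Prime := by
  induction k with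
  | zero => exact lpf_prime
  | succ k ih => intro num; exact ih (lpf num + 1)

theorem kthFrom_of_not_prime {num : Nat} (k : Nat) (h : ¬ num.Prime) :
    kthFrom k num = kthFrom k (num + 1) := by
  cases k with
  | zero => exact lpf_succ_of_not_prime h
  | succ k => simp only [kthFrom, lpf_succ_of_not_prime h]

theorem kthFrom_succ_right (k : Nat) : ∀ num, kthFrom (k + 1) num = lpf (kthFrom k num + 1) := by
  induction k with
  | zero => intro num; rfl
  | succ k ih =>
    intro num
    show kthFrom (k + 1) (lpf num + 1) = _
    rw [ih (lpf num + 1)]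
    rfl

theorem kthFrom_two_lb (k : Nat) : k + 2 ≤ kthFrom k 2 := by
  induction k with
  | zero => simp [kthFrom, lpf_of_prime Nat.prime_two]
  | succ k ih =>
    rw [kthFrom_succ_right]
    have := lpf_ge (kthFrom k 2 + 1)
    omega

theorem kthFrom_two_le_pow (k : Nat) : kthFrom k 2 ≤ 2 ^ (k + 1) := by
  induction k with
  | zero => simp [kthFrom, lpf_of_prime Nat.prime_two]
  | succ k ih =>
    rw [kthFrom_succ_right]
    have h2 : 2 ≤ kthFrom k 2 := by have := kthFrom_two_lb k; omega
    calc lpf (kthFrom k 2 + 1) ≤ 2 * kthFrom k 2 := lpf_le_two_mul h2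
      _ ≤ 2 * 2 ^ (k + 1) := by omega
      _ = 2 ^ (k + 2) := by ring

-- ---- the scan of nth_prime computes kthFrom ----

theorem nthAux_eq (f : Nat) : ∀ n c num k, c + (k + 1) = n → kthFrom k num < num + f →
    nthPrimeAux n f c num = kthFrom k num := by
  induction f with
  | zero =>
    intro n c num k _ hfuel
    have := kthFrom_ge k num
    omega
  | succ f ih =>
    intro n c num k hn hfuel
    simp only [nthPrimeAux]
    by_cases hp : isPrimeA num = true
    · have hprime : num.Prime := (isPrimeA_iff num).mp hp
      rw [if_pos hp]
      cases k with
      | zero =>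
        have : c + 1 = n := by omega
        rw [if_pos this]
        show _ = lpf num
        rw [lpf_of_prime hprime]
      | succ k =>
        rw [if_neg (by omega)]
        have hrw : kthFrom (k + 1) num = kthFrom k (num + 1) := by
          show kthFrom k (lpf num + 1) = _
          rw [lpf_of_prime hprime]
        rw [hrw]
        exact ih n (c + 1) (num + 1) k (by omega) (by rw [← hrw]; omega)
    · have hnp : ¬ num.Prime := fun hh => hp ((isPrimeA_iff num).mpr hh)
      rw [if_neg hp]
      rw [if_neg (by omega)]
      rw [kthFrom_of_not_prime k hnp] at hfuel ⊢
      exact ih n c (num + 1) k (by omega) (by omega)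

theorem nthA_eq (k : Nat) : nthPrimeA (k + 1) = kthFrom k 2 := by
  unfold nthPrimeA
  apply nthAux_eq
  · omega
  · have h1 := kthFrom_two_le_pow k
    have h2 : 2 ^ (k + 1) < 2 ^ (k + 1 + 1) := by
      exact Nat.pow_lt_pow_right (by omega) (by omega)
    omega

theorem nthA_prime (k : Nat) : (nthPrimeA (k + 1)).Prime := by
  rw [nthA_eq]; exact kthFrom_prime k 2

theorem nthA_one : nthPrimeA 1 = 2 := by
  have := nthA_eq 0
  simpa [kthFrom, lpf_of_prime Nat.prime_two] using this

theorem nthA_lb (k : Nat) : k + 2 ≤ nthPrimeA (k + 1) := by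
  rw [nthA_eq]; exact kthFrom_two_lb k

theorem nthA_next {k q : Nat} (hq : q.Prime) (hlt : nthPrimeA (k + 1) < q) :
    nthPrimeA (k + 2) ≤ q := by
  rw [nthA_eq] at hlt ⊢
  rw [kthFrom_succ_right]
  exact lpf_min hq (by omega)

-- ---- canonical factorization string (common value of both loops) ----

def canon (n : Nat) : String :=
  if _h : 2 ≤ n then
    PySem.Dict.getD revMapA (divOut n n.minFac).2 "" ++ canon (divOut n n.minFac).1
  else ""
termination_by n
decreasing_by
  exact divOut_fst_lt (Nat.minFac_prime (by omega)).two_le (by omega) (Nat.minFac_dvd n)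

theorem canon_of_lt {n : Nat} (h : n < 2) : canon n = "" := by
  rw [canon, dif_neg (by omega)]

theorem canon_step {n p : Nat} (hp : p.Prime) (hdvd : p ∣ n) (h2 : 2 ≤ n)
    (hmin : ∀ q, q.Prime → q ∣ n → p ≤ q) :
    canon n = PySem.Dict.getD revMapA (divOut n p).2 "" ++ canon (divOut n p).1 := by
  have hpm : n.minFac = p := by
    apply le_antisymm
    · exact Nat.minFac_le_of_dvd hp.two_le hdvd
    · exact hmin n.minFac (Nat.minFac_prime (by omega)) (Nat.minFac_dvd n)
  rw [canon, dif_pos h2, hpm]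

theorem divOut_self_prime {p : Nat} (hp : p.Prime) : divOut p p = (1, 1) := by
  have h1 : p / p = 1 := Nat.div_self hp.pos
  have hnd : ¬ p ∣ 1 := fun hd => by
    have := Nat.le_of_dvd (by omega) hd
    have := hp.two_le
    omega
  rw [divOut, dif_pos ⟨hp.two_le, dvd_refl p, hp.pos⟩, h1, divOut_of_not_dvd hnd]

theorem canon_prime {p : Nat} (hp : p.Prime) : canon p = PySem.Dict.getD revMapA 1 "" := by
  rw [canon_step hp (dvd_refl p) hp.two_le (fun q hq hdvd => (Nat.prime_dvd_prime_iff_eq hq hp).mp hdvd ▸ le_refl _)]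
  rw [divOut_self_prime hp]
  simp [canon_of_lt]

-- ---- join helpers ----

theorem join_empty_eq_flatten (xs : List (List Char)) :
    PySem.Chars.join [] xs = xs.flatten := by
  induction xs with
  | nil => rfl
  | cons a r ih =>
    cases r with
    | nil => simp [PySem.Chars.join, List.intercalate]
    | cons b t => rw [PySem.Chars.join_cons_cons, ih]; simp

theorem join_snoc (xs : List String) (s : String) :
    PySem.Str.join "" (xs ++ [s]) = PySem.Str.join "" xs ++ s := by
  apply String.toList_inj.mp
  simp [PySem.Str.join, join_empty_eq_flatten]

theorem join_nil_str : PySem.Str.join "" ([] : List String) = "" := rfl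

-- ---- the two loops both compute canon ----

theorem aLoopA_eq (f : Nat) : ∀ g i acc, 0 < g → g < f + i → 1 ≤ i →
    (∀ q, q.Prime → q ∣ g → nthPrimeA i ≤ q) →
    aLoopA f g i acc = acc ++ canon g := by
  induction f with
  | zero =>
    intro g i acc hg hfuel hi hinv
    obtain ⟨k, rfl⟩ : ∃ k, i = k + 1 := ⟨i - 1, by omega⟩
    have hg1 : g = 1 := by
      by_contra hne
      have h2 : 2 ≤ g := by omega
      have hmf := Nat.minFac_prime (show g ≠ 1 by omega)
      have h3 := hinv g.minFac hmf (Nat.minFac_dvd g)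
      have h4 : g.minFac ≤ g := Nat.minFac_le (by omega)
      have h5 := nthA_lb k
      omega
    subst hg1
    simp [aLoopA, canon_of_lt]
  | succ f ih =>
    intro g i acc hg hfuel hi hinv
    obtain ⟨k, rfl⟩ : ∃ k, i = k + 1 := ⟨i - 1, by omega⟩
    simp only [aLoopA]
    by_cases h1 : 1 < g
    · rw [if_pos h1]
      have hp : (nthPrimeA (k + 1)).Prime := nthA_prime k
      by_cases hdvd : nthPrimeA (k + 1) ∣ g
      · obtain ⟨hr1, hr2, hr3⟩ := divOut_spec g (nthPrimeA (k + 1)) hp.two_le hg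
        have hexp := divOut_exp_pos hp.two_le hdvd hg
        rw [if_pos hexp]
        have hlt := divOut_fst_lt hp.two_le hg hdvd
        have hrec := ih (divOut g (nthPrimeA (k + 1))).1 (k + 2)
          (acc ++ PySem.Dict.getD revMapA (divOut g (nthPrimeA (k + 1))).2 "") hr1 (by omega)
          (by omega) ?_
        · rw [hrec]
          rw [canon_step hp hdvd (show 2 ≤ g by omega) (fun q hq hd => hinv q hq hd)]
          rw [String.append_assoc]
        · intro q hq hqd
          have hqg : q ∣ g := hqd.trans (Dvd.intro _ hr3.symm)
          have := hinv q hq hqg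
          have hne : q ≠ nthPrimeA (k + 1) := by
            rintro rfl; exact hr2 hqd
          exact nthA_next hq (by omega)
      · rw [divOut_of_not_dvd hdvd]
        rw [if_neg (by omega)]
        apply ih g (k + 2) acc hg (by omega) (by omega)
        intro q hq hqd
        have := hinv q hq hqd
        have hne : q ≠ nthPrimeA (k + 1) := by rintro rfl; exact hdvd hqd
        exact nthA_next hq (by omega)
    · rw [if_neg h1]
      have : g = 1 := by omega
      subst this
      simp [canon_of_lt]

theorem bLoopB_eq (m : Nat) : ∀ n d parts, n + 2 - d ≤ m → 2 ≤ d → 0 < n →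
    (∀ q, q.Prime → q ∣ n → d ≤ q) →
    PySem.Str.join "" (bLoopB n d parts) = PySem.Str.join "" parts ++ canon n := by
  induction m with
  | zero =>
    intro n d parts hm hd hn hinv
    have hdn : n + 2 ≤ d := by omega
    have hn1 : n = 1 := by
      by_contra hne
      have hmf := Nat.minFac_prime hne
      have h3 := hinv n.minFac hmf (Nat.minFac_dvd n)
      have h4 : n.minFac ≤ n := Nat.minFac_le (by omega)
      omega
    subst hn1
    rw [bLoopB, dif_neg ?_, if_neg (by omega), canon_of_lt (by omega)]
    · simp
    · rintro ⟨-, hdd⟩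
      have : d ≤ d * d := Nat.le_mul_of_pos_left d (by omega)
      omega
  | succ m ih =>
    intro n d parts hm hd hn hinv
    rw [bLoopB]
    by_cases hdd : d * d ≤ n
    · rw [dif_pos ⟨hd, hdd⟩]
      by_cases hdvd : d ∣ n
      · -- d is prime here: its least prime factor divides n, so is ≥ d
        have hdp : d.Prime := by
          have hmf := Nat.minFac_prime (show d ≠ 1 by omega)
          have h1 : d.minFac ∣ n := (Nat.minFac_dvd d).trans hdvd
          have h2 := hinv d.minFac hmf h1
          have h3 : d.minFac ≤ d := Nat.minFac_le (by omega)
          have : d.minFac = d := by omega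
          exact this ▸ hmf
        have hdmul : d ≤ d * d := Nat.le_mul_of_pos_left d (by omega)
        obtain ⟨hr1, hr2, hr3⟩ := divOut_spec n d hd hn
        have hexp := divOut_exp_pos hd hdvd hn
        rw [if_pos hexp]
        have hle := divOut_fst_le n d
        have hrec := ih (divOut n d).1 (d + 1)
          (parts ++ [PySem.Dict.getD revMapB (divOut n d).2 ""]) (by omega) (by omega) hr1 ?_
        · rw [hrec, join_snoc, maps_eq]
          rw [canon_step hdp hdvd (show 2 ≤ n by omega) (fun q hq hdd' => hinv q hq hdd')]
          rw [String.append_assoc]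
        · intro q hq hqd
          have hqg : q ∣ n := hqd.trans (Dvd.intro _ hr3.symm)
          have := hinv q hq hqg
          have hne : q ≠ d := by rintro rfl; exact hr2 hqd
          omega
      · rw [divOut_of_not_dvd hdvd]
        rw [if_neg (by omega)]
        apply ih n (d + 1) parts (by omega) (by omega) hn
        intro q hq hqd
        have := hinv q hq hqd
        have hne : q ≠ d := by rintro rfl; exact hdvd hqd
        omega
    · rw [dif_neg (by tauto)]
      by_cases h1 : 1 < n
      · -- n is prime: otherwise minFac n ^ 2 ≤ n and minFac n ≥ d give d*d ≤ n
        have hnp : n.Prime := by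
          by_contra hcon
          have hsq := Nat.minFac_sq_le_self hn hcon
          have hmf := Nat.minFac_prime (show n ≠ 1 by omega)
          have h3 := hinv n.minFac hmf (Nat.minFac_dvd n)
          have h5 : d * d ≤ n.minFac * n.minFac := Nat.mul_le_mul h3 h3
          rw [pow_two] at hsq
          exact hdd (le_trans h5 hsq)
        rw [if_pos h1, join_snoc, maps_eq, canon_prime hnp]
      · rw [if_neg h1]
        have : n = 1 := by omega
        subst this
        simp [canon_of_lt]

-- ===== VERDICT (by name: the statement is the Claim_ definition above) =====
theorem formulize_spec : Claim_equal_formulize := by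
  unfold Claim_equal_formulize Spec_formulize
  intro g _dom _pre
  unfold formulize formulize_alt
  by_cases ht : 2 ≤ g.toNat
  · rw [aLoopA_eq (g.toNat + 1) g.toNat 1 "" (by omega) (by omega) (by omega) ?_]
    · rw [bLoopB_eq g.toNat g.toNat 2 [] (by omega) (by omega) (by omega) ?_]
      · rw [join_nil_str]
      · intro q hq _; exact hq.two_le
    · intro q hq _
      rw [nthA_one]; exact hq.two_le
  · have h1 : ¬ 1 < g.toNat := by omega
    rw [show g.toNat + 1 = g.toNat + 1 from rfl]
    simp only [aLoopA, if_neg h1]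
    rw [bLoopB, dif_neg (by omega), if_neg h1]
    rfl
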